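-- pv_equiv track=rewrite | github.com/ZexiDilling/MolFormatic | bio_plate_dilution.py | _dilution_plates
-- ===== SOURCE A (Python) =====
-- def _dilution_plates(concentration_counter, dilution_factor):
--     """
--     Calculates the plates that needs to be used for different dilutions
--     :return:
--     """
--     plate_dict = {}
--     source_plate_name_list = []
--     plate_name = "LDV"
--     df = []
--     for x in range(1, concentration_counter+1):
--         df.append(dilution_factor ** (x-1))
--         if x % 2 == 0:
--             plate_dict[f"{plate_name}_D{int((x / 2) - 1)}"] = df
--             df = []
--             source_plate_name_list.append(f"{plate_name}_D{int((x / 2) - 1)}")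
--
--     return plate_dict, source_plate_name_list
-- ===== SOURCE B (Python) =====
-- def _dilution_plates(concentration_counter, dilution_factor):
--     """
--     Calculates the plates that needs to be used for different dilutions
--     :return:
--     """
--     pair_count = concentration_counter // 2
--     keys = [f"LDV_D{i}" for i in range(pair_count)]
--     values = [[dilution_factor ** (2 * i), dilution_factor ** (2 * i + 1)]
--               for i in range(pair_count)]
--     return dict(zip(keys, values)), keys
-- ===== Notes on version B (the rewrite author's own statement) =====
-- stated objective: simpler
-- what changed: Replaces A's stateful single loop (df accumulator flushed on x % 2 == 0) by three staged comprehensions: a keys list and a values list indexed by pair number, zipped into the dict at the end; concentration_counter // 2 discards the unpaired trailing element exactly as A does.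
import Mathlib
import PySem

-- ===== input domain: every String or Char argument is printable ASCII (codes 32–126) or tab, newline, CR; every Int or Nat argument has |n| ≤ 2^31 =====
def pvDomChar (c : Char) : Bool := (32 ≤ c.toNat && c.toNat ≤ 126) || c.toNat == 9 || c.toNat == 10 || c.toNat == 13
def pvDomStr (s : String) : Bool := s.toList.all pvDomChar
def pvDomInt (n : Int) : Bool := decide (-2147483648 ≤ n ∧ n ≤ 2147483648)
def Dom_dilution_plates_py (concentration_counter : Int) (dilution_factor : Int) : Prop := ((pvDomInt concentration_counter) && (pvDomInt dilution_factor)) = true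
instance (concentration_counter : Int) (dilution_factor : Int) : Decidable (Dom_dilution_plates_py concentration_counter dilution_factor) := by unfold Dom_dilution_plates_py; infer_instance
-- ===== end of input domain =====

-- B replaces A's stateful single loop (df accumulator flushed on x % 2 == 0) by staged
-- comprehensions: a keys list and a values list indexed by pair number, zipped into the dict.


-- ===== PORT A =====
-- loop body of A: df.append(dilution_factor ** (x-1)); flush on x % 2 == 0.
-- The key f"{plate_name}_D{int((x / 2) - 1)}" is ported as floordiv x 2 - 1: at the point it is
-- evaluated x is even with 2 ≤ x ≤ 2^31, so Python's float x/2 is exact and int((x/2)-1) = x//2 - 1.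
def pvStepA (dilution_factor : Int)
    (st : PySem.Dict String (List Int) × List String × List Int) (x : Int) :
    PySem.Dict String (List Int) × List String × List Int :=
  let df := st.2.2 ++ [dilution_factor ^ (x - 1).toNat]
  if PySem.Int.mod x 2 = 0 then
    let key := "LDV_D" ++ PySem.Int.toStr (PySem.Int.floordiv x 2 - 1)
    (st.1.insert key df, st.2.1 ++ [key], ([] : List Int))
  else
    (st.1, st.2.1, df)

def dilution_plates_py (concentration_counter : Int) (dilution_factor : Int) : (List (String × List Int)) × List String :=
  let st := (PySem.List.pyRange 1 (concentration_counter + 1) 1).foldl (pvStepA dilution_factor)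
    ((PySem.Dict.empty : PySem.Dict String (List Int)), ([] : List String), ([] : List Int))
  (st.1.items, st.2.1)

-- ===== PORT B =====
-- Source B: pair_count = cc // 2; keys and values as two comprehensions over range(pair_count);
-- the returned dict is dict(zip(keys, values)) = PySem.Dict.ofList of the zipped pairs.
def dilution_plates_py_alt (concentration_counter : Int) (dilution_factor : Int) : (List (String × List Int)) × List String :=
  let pairCount := PySem.Int.floordiv concentration_counter 2
  let keys := (PySem.List.pyRange 0 pairCount 1).map (fun i => "LDV_D" ++ PySem.Int.toStr i)
  let values := (PySem.List.pyRange 0 pairCount 1).map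
    (fun i => [dilution_factor ^ (2 * i).toNat, dilution_factor ^ (2 * i + 1).toNat])
  ((PySem.Dict.ofList (keys.zip values)).items, keys)

-- ===== PRECONDITION & SPEC =====
def Spec_dilution_plates_py (concentration_counter : Int) (dilution_factor : Int) (out : (List (String × List Int)) × List String) : Prop := out = dilution_plates_py_alt concentration_counter dilution_factor
instance (concentration_counter : Int) (dilution_factor : Int) (out : (List (String × List Int)) × List String) : Decidable (Spec_dilution_plates_py concentration_counter dilution_factor out) := by unfold Spec_dilution_plates_py; infer_instance

-- ===== CLAIM (what is proved, stated in full; the proofs are below) =====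
def Claim_equal_dilution_plates_py : Prop := ∀ (concentration_counter : Int) (dilution_factor : Int), Dom_dilution_plates_py concentration_counter dilution_factor → Spec_dilution_plates_py concentration_counter dilution_factor (dilution_plates_py concentration_counter dilution_factor)

-- ===== LEMMAS AND PROOFS =====

-- Proof-side abbreviations for the i-th pair's key and value list.
def pvKey (i : Int) : String := "LDV_D" ++ PySem.Int.toStr i
def pvVal (dilution_factor : Int) (i : Int) : List Int :=
  [dilution_factor ^ (2 * i).toNat, dilution_factor ^ (2 * i + 1).toNat]

-- Proof-side per-pair step: insert the i-th pair and record its key.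
def pvStepB (dilution_factor : Int)
    (st : PySem.Dict String (List Int) × List String) (i : Int) :
    PySem.Dict String (List Int) × List String :=
  (st.1.insert (pvKey i) (pvVal dilution_factor i), st.2 ++ [pvKey i])

-- Two consecutive steps of A's loop (odd x = 2j+1, then even x = 2j+2) are one step of pvStepB.
lemma pvLoop (dilution_factor : Int) (m : Nat) : ∀ (j : Int) (d : PySem.Dict String (List Int)) (l : List String), 0 ≤ j →
    (PySem.List.pyRange (2 * j + 1) (2 * j + 1 + 2 * (m : Int)) 1).foldl (pvStepA dilution_factor) (d, l, ([] : List Int)) =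
      (((PySem.List.pyRange j (j + (m : Int)) 1).foldl (pvStepB dilution_factor) (d, l)).1,
       ((PySem.List.pyRange j (j + (m : Int)) 1).foldl (pvStepB dilution_factor) (d, l)).2,
       ([] : List Int)) := by
  induction m with
  | zero =>
    intro j d l _
    rw [PySem.List.pyRange_one_eq_nil (by omega), PySem.List.pyRange_one_eq_nil (by omega)]
    simp [List.foldl]
  | succ m ih =>
    intro j d l hj
    rw [PySem.List.pyRange_one_cons (a := 2 * j + 1) (by push_cast; omega),
        PySem.List.pyRange_one_cons (a := 2 * j + 1 + 1) (by push_cast; omega),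
        PySem.List.pyRange_one_cons (a := j) (by push_cast; omega)]
    simp only [List.foldl_cons]
    have hodd : PySem.Int.mod (2 * j + 1) 2 ≠ 0 := by
      rw [PySem.Int.mod_eq_emod_of_pos (by omega : (0:Int) < 2)]; omega
    have heven : PySem.Int.mod (2 * j + 1 + 1) 2 = 0 := by
      rw [PySem.Int.mod_eq_emod_of_pos (by omega : (0:Int) < 2)]; omega
    have hkey : PySem.Int.floordiv (2 * j + 1 + 1) 2 - 1 = j := by
      rw [PySem.Int.floordiv_eq_ediv_of_pos (by omega : (0:Int) < 2)]; omega
    have ea : 2 * j + 1 - 1 = 2 * j := by ring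
    have eb : 2 * j + 1 + 1 - 1 = 2 * j + 1 := by ring
    have hA : pvStepA dilution_factor (pvStepA dilution_factor (d, l, ([] : List Int)) (2 * j + 1)) (2 * j + 1 + 1)
        = ((pvStepB dilution_factor (d, l) j).1, (pvStepB dilution_factor (d, l) j).2, ([] : List Int)) := by
      simp only [pvStepA, pvStepB, pvKey, pvVal, if_neg hodd, if_pos heven, hkey, ea, eb,
        List.nil_append, List.singleton_append]
    rw [hA]
    have h1 : 2 * j + 1 + 1 + 1 = 2 * (j + 1) + 1 := by ring
    have h2 : 2 * j + 1 + 2 * ((m : Int) + 1) = 2 * (j + 1) + 1 + 2 * (m : Int) := by ring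
    have h3 : j + ((m : Int) + 1) = (j + 1) + (m : Int) := by ring
    push_cast
    rw [h1, h2, h3]
    exact ih (j + 1) (pvStepB dilution_factor (d, l) j).1 (pvStepB dilution_factor (d, l) j).2 (by omega)

-- A's step at an odd x only touches the df list, which the return value discards.
lemma pvOddStep (dilution_factor : Int) (x : Int) (h : PySem.Int.mod x 2 ≠ 0)
    (d : PySem.Dict String (List Int)) (l : List String) (df : List Int) :
    pvStepA dilution_factor (d, l, df) x = (d, l, df ++ [dilution_factor ^ (x - 1).toNat]) := by
  simp only [pvStepA, if_neg h]

-- The pvStepB fold splits into the dict-building insert fold and the list of keys.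
lemma pvBridge (dilution_factor : Int) : ∀ (r : List Int)
    (d : PySem.Dict String (List Int)) (l : List String),
    r.foldl (pvStepB dilution_factor) (d, l) =
      (r.foldl (fun d i => d.insert (pvKey i) (pvVal dilution_factor i)) d, l ++ r.map pvKey) := by
  intro r
  induction r with
  | nil => intro d l; simp [List.foldl]
  | cons a t ih =>
    intro d l
    simp only [List.foldl_cons, List.map_cons, pvStepB]
    rw [ih]
    simp [List.append_assoc]

-- B's staged construction produces exactly the insert fold's items and the keys list.
lemma pvAltEq (concentration_counter dilution_factor : Int) :
    dilution_plates_py_alt concentration_counter dilution_factor =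
      (((PySem.List.pyRange 0 (PySem.Int.floordiv concentration_counter 2) 1).foldl
          (fun d i => d.insert (pvKey i) (pvVal dilution_factor i))
          (PySem.Dict.empty : PySem.Dict String (List Int))).items,
       (PySem.List.pyRange 0 (PySem.Int.floordiv concentration_counter 2) 1).map pvKey) := by
  unfold dilution_plates_py_alt
  simp only [List.zip_map', PySem.Dict.ofList, PySem.Dict.update, List.foldl_map, pvKey, pvVal]
  rfl

-- ===== VERDICT (by name: the statement is the Claim_ definition above) =====
theorem dilution_plates_py_spec : Claim_equal_dilution_plates_py := by
  intro cc dfac _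
  unfold Spec_dilution_plates_py
  rw [pvAltEq]
  unfold dilution_plates_py
  by_cases hcc : cc ≤ 0
  · have hq : PySem.Int.floordiv cc 2 ≤ 0 := by
      rw [PySem.Int.floordiv_eq_ediv_of_pos (by omega : (0:Int) < 2)]; omega
    rw [PySem.List.pyRange_one_eq_nil (by omega), PySem.List.pyRange_one_eq_nil (by omega)]
    rfl
  · push Not at hcc
    have hq0 : PySem.Int.floordiv cc 2 = cc / 2 := PySem.Int.floordiv_eq_ediv_of_pos (by omega)
    rw [hq0]
    set q : Int := cc / 2 with hqdef
    have hq1 : 0 ≤ q := by omega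
    have hsplit : PySem.List.pyRange 1 (cc + 1) 1
        = PySem.List.pyRange 1 (2 * q + 1) 1 ++ PySem.List.pyRange (2 * q + 1) (cc + 1) 1 :=
      PySem.List.pyRange_one_append _ _ _ (by omega) (by omega)
    rw [hsplit, List.foldl_append]
    have hcast : ((q.toNat : Int)) = q := Int.toNat_of_nonneg hq1
    have hmain := pvLoop dfac q.toNat 0 PySem.Dict.empty [] (by omega)
    rw [hcast] at hmain
    have e1 : 2 * (0:Int) + 1 = 1 := by ring
    rw [e1] at hmain
    have e2 : 1 + 2 * q = 2 * q + 1 := by ring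
    have e3 : (0:Int) + q = q := by ring
    rw [e2, e3] at hmain
    rw [hmain, pvBridge]
    by_cases hpar : cc % 2 = 0
    · have hnil : PySem.List.pyRange (2 * q + 1) (cc + 1) 1 = [] :=
        PySem.List.pyRange_one_eq_nil (by omega)
      rw [hnil]
      rfl
    · have hone : PySem.List.pyRange (2 * q + 1) (cc + 1) 1 = [2 * q + 1] := by
        have : cc + 1 = (2 * q + 1) + 1 := by omega
        rw [this]; exact PySem.List.pyRange_one_singleton _
      rw [hone]
      simp only [List.foldl_cons, List.foldl_nil]
      rw [pvOddStep dfac (2 * q + 1)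
        (by rw [PySem.Int.mod_eq_emod_of_pos (by omega : (0:Int) < 2)]; omega)]
      simp
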